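-- pv_equiv track=rewrite | github.com/f1r3k3rn/codeforces | contests/990/B.py | solve
-- ===== SOURCE A (Python) =====
-- from math import factorial
--
-- def solve(n, vet):
--
--     lower_case = "abcdefghijklmnopqrstuvwxyz"
--     reworked = ""
--
--     for i in lower_case:
--         if i in vet:
--             reworked += i
--
--     best = ""
--     bestv = 0
--
--
--     for i in range(n):
--         for j in reworked:
--             ret = vet[:i] + [j] + vet[i+1:]
--
--             dn = 1
--             for j in lower_case:
--                 dn *= factorial(ret.count(j))
--
--             if dn > bestv:
--                 best = ret
--                 bestv = dn
--
--     return  "".join(best)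
-- ===== SOURCE B (Python) =====
-- from math import factorial
--
-- def solve(n, vet):
--     # B: precompute per-letter counts once, then score each candidate in O(26)
--     # instead of recounting the whole list per letter (same scan order and
--     # strict-improvement rule as A, so the same candidate wins).
--     lower = "abcdefghijklmnopqrstuvwxyz"
--     present = [c for c in lower if c in vet]
--     cnt = {}
--     for c in lower:
--         cnt[c] = vet.count(c)
--     m = len(vet)
--     best = None
--     bestv = 0
--     for i in range(n):
--         x = vet[i] if i < m else None
--         Pi = 1
--         for c in lower:
--             Pi *= factorial(cnt[c] - (1 if c == x else 0))
--         for j in present: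
--             dn = Pi * (cnt[j] - (1 if j == x else 0) + 1)
--             if dn > bestv:
--                 bestv = dn
--                 best = (i, j)
--     if best is None:
--         return ""
--     i, j = best
--     return "".join(vet[:i] + [j] + vet[i+1:])
-- ===== Notes on version B (the rewrite author's own statement) =====
-- stated objective: faster
-- what changed: B precomputes the 26 letter counts of vet once and scores each candidate replacement as a 26-factor product with an O(1) bump for the replaced/inserted letter, instead of A's rebuilding the candidate list and recounting it 26 times for every (position, letter) pair; the winning (i,j) is materialised only once at the end.
import Mathlib
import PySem

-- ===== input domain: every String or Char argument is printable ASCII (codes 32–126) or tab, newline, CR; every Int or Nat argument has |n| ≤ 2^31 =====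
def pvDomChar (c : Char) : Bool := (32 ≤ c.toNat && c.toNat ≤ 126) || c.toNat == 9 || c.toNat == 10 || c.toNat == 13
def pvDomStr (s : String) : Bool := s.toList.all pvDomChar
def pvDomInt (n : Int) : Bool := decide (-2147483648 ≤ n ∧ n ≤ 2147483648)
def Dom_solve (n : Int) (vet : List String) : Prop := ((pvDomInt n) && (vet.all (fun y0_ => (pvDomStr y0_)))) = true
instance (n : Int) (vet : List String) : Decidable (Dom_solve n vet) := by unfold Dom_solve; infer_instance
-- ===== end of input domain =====

-- B precomputes the 26 letter counts once and scores each candidate replacement with an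
-- O(1) factorial bump instead of rebuilding and recounting the candidate list (faster).


-- math.factorial
def pyFact : Nat → Nat
  | 0 => 1
  | Nat.succ k => Nat.succ k * pyFact k

-- the literal "abcdefghijklmnopqrstuvwxyz", iterated character by character
def lowerChars : List Char :=
  ['a','b','c','d','e','f','g','h','i','j','k','l','m','n','o','p','q','r','s','t','u','v','w','x','y','z']

-- ===== PORT A =====
-- A's innermost loop: dn = 1; for j in lower_case: dn *= factorial(ret.count(j))
def dnOf (ret : List String) : Nat :=
  lowerChars.foldl (fun d l => d * pyFact (PySem.List.count ret (String.ofList [l]))) 1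

-- A's body of "for j in reworked": build ret, score it, keep it on strict improvement
def innerA (vet : List String) (i : Int) (st : List String × Nat) (j : Char) :
    List String × Nat :=
  let ret := PySem.List.slice vet none (some i) ++ [String.ofList [j]]
             ++ PySem.List.slice vet (some (i + 1)) none
  let dn := dnOf ret
  if dn > st.2 then (ret, dn) else st

def solve (n : Int) (vet : List String) : String :=
  let reworked : List Char := lowerChars.foldl
    (fun acc i => if vet.contains (String.ofList [i]) then acc ++ [i] else acc) []
  let res : List String × Nat := (PySem.List.pyRange 0 n 1).foldl
    (fun st i => reworked.foldl (innerA vet i) st) ([], 0)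
  PySem.Str.join "" res.1

-- ===== PORT B =====
-- cnt = {}; for c in lower: cnt[c] = vet.count(c)
def cntOf (vet : List String) : PySem.Dict String Nat :=
  lowerChars.foldl
    (fun d c => d.insert (String.ofList [c]) (PySem.List.count vet (String.ofList [c])))
    PySem.Dict.empty

-- B's body of "for j in present": dn = Pi * (cnt[j] - (1 if j == x else 0) + 1)
def innerB (cnt : PySem.Dict String Nat) (x : Option String) (Pi : Nat) (i : Int)
    (st : Option (Int × Char) × Nat) (j : Char) : Option (Int × Char) × Nat :=
  let dn := Pi * (cnt.getD (String.ofList [j]) 0 -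
                  (if some (String.ofList [j]) = x then 1 else 0) + 1)
  if dn > st.2 then (some (i, j), dn) else st

-- B's body of "for i in range(n)": x, Pi, then the inner loop over present
def outerB (vet : List String) (present : List Char) (cnt : PySem.Dict String Nat)
    (st : Option (Int × Char) × Nat) (i : Int) : Option (Int × Char) × Nat :=
  let x : Option String := if i < (vet.length : Int) then PySem.List.pyGet? vet i else none
  let Pi : Nat := lowerChars.foldl
    (fun p c => p * pyFact (cnt.getD (String.ofList [c]) 0 -
                            (if some (String.ofList [c]) = x then 1 else 0))) 1
  present.foldl (innerB cnt x Pi i) st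

def solve_alt (n : Int) (vet : List String) : String :=
  let present : List Char := lowerChars.filter (fun c => vet.contains (String.ofList [c]))
  let cnt := cntOf vet
  let res : Option (Int × Char) × Nat :=
    (PySem.List.pyRange 0 n 1).foldl (outerB vet present cnt) (none, 0)
  match res.1 with
  | none => ""
  | some (i, j) =>
      PySem.Str.join "" (PySem.List.slice vet none (some i) ++ [String.ofList [j]]
                         ++ PySem.List.slice vet (some (i + 1)) none)

-- ===== PRECONDITION & SPEC =====
def Spec_solve (n : Int) (vet : List String) (out : String) : Prop := out = solve_alt n vet
instance (n : Int) (vet : List String) (out : String) : Decidable (Spec_solve n vet out) := by unfold Spec_solve; infer_instance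

-- ===== CLAIM (what is proved, stated in full; the proofs are below) =====
def Claim_equal_solve : Prop := ∀ (n : Int) (vet : List String), Dom_solve n vet → Spec_solve n vet (solve n vet)

-- ===== LEMMAS AND PROOFS =====

-- the candidate list vet[:i] + [j] + vet[i+1:]
def retOf (vet : List String) (i : Int) (j : Char) : List String :=
  PySem.List.slice vet none (some i) ++ [String.ofList [j]]
  ++ PySem.List.slice vet (some (i + 1)) none

-- count of letter c in vet with the element at position i (if it equals that letter) removed
def fcnt (vet : List String) (i : Int) (c : Char) : Nat :=
  vet.count (String.ofList [c]) -
    (if PySem.List.pyGet? vet i = some (String.ofList [c]) then 1 else 0)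

-- the factorial product over the removed-element counts
def piVal (vet : List String) (i : Int) : Nat :=
  (lowerChars.map (fun c => pyFact (fcnt vet i c))).prod

-- A's best list reconstructed from B's best (position, letter)
def recon (vet : List String) : Option (Int × Char) → List String
  | none => []
  | some (i, j) => retOf vet i j

theorem lowerNodup : lowerChars.Nodup := by decide

theorem keysNodup : (lowerChars.map (fun c => String.ofList [c])).Nodup := by decide

theorem count_take_drop (xs : List String) (k : Nat) (s : String) :
    (xs.take k).count s + (xs.drop (k + 1)).count s +
      (if xs[k]? = some s then 1 else 0) = xs.count s := by
  induction xs generalizing k with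
  | nil => simp
  | cons a t ih =>
    cases k with
    | zero =>
      simp only [List.take_zero, List.drop_succ_cons, List.drop_zero, List.getElem?_cons_zero,
        List.count_nil, List.count_cons, Option.some.injEq]
      split_ifs with h1 h2 <;> simp_all
    | succ k =>
      simp only [List.take_succ_cons, List.drop_succ_cons, List.getElem?_cons_succ, List.count_cons]
      have := ih k
      split_ifs at this ⊢ <;> omega

theorem count_retOf (vet : List String) (i : Int) (hi : 0 ≤ i) (j l : Char) :
    (retOf vet i j).count (String.ofList [l]) = fcnt vet i l + (if l = j then 1 else 0) := by
  unfold retOf fcnt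
  rw [PySem.List.slice_to vet hi, PySem.List.slice_from vet (by omega : (0:Int) ≤ i + 1),
    PySem.List.pyGet?_of_nonneg vet hi]
  have h1 : (i + 1).toNat = i.toNat + 1 := by omega
  rw [h1, List.count_append, List.count_append]
  have h2 := count_take_drop vet i.toNat (String.ofList [l])
  have h3 : List.count (String.ofList [l]) [String.ofList [j]] = (if l = j then 1 else 0) := by
    by_cases h : l = j
    · subst h; simp
    · have : String.ofList [j] ≠ String.ofList [l] := by
        intro hh
        rw [String.ofList_inj] at hh
        injection hh with hh1 _
        exact h hh1.symm
      simp [this, h]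
  rw [h3]
  split_ifs at h2 ⊢ <;> omega

theorem foldl_mul_eq (L : List Char) (f : Char → Nat) (a : Nat) :
    L.foldl (fun p l => p * f l) a = a * (L.map f).prod := by
  induction L generalizing a with
  | nil => simp
  | cons c t ih => simp [List.foldl_cons, ih, mul_assoc]

theorem prod_bump (L : List Char) (hnd : L.Nodup) (j : Char) (hj : j ∈ L) (f : Char → Nat) :
    (L.map (fun l => pyFact (f l + if l = j then 1 else 0))).prod
      = (L.map (fun l => pyFact (f l))).prod * (f j + 1) := by
  obtain ⟨L1, L2, rfl⟩ := List.append_of_mem hj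
  have h' := List.nodup_middle.mp hnd
  rw [List.nodup_cons] at h'
  have hj1 : j ∉ L1 := fun h => h'.1 (List.mem_append_left _ h)
  have hj2 : j ∉ L2 := fun h => h'.1 (List.mem_append_right _ h)
  have e1 : ∀ (M : List Char), j ∉ M →
      (M.map (fun l => pyFact (f l + if l = j then 1 else 0))).prod
        = (M.map (fun l => pyFact (f l))).prod := by
    intro M hM
    apply congrArg
    apply List.map_congr_left
    intro a ha
    have : a ≠ j := fun h => hM (h ▸ ha)
    simp [this]
  have hfj : pyFact (f j + 1) = (f j + 1) * pyFact (f j) := rfl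
  simp only [List.map_append, List.map_cons, List.prod_append, List.prod_cons, e1 L1 hj1,
    e1 L2 hj2, if_true]
  rw [hfj]; ring

theorem getD_cnt (vet : List String) (l : Char) (hl : l ∈ lowerChars) :
    (cntOf vet).getD (String.ofList [l]) 0 = vet.count (String.ofList [l]) := by
  have h0 : (PySem.Dict.empty : PySem.Dict String Nat).items = [] := rfl
  have hitems := PySem.Dict.items_foldl_insert_fresh lowerChars
      (fun c => String.ofList [c]) (fun c => PySem.List.count vet (String.ofList [c]))
      PySem.Dict.empty (by intro a _; exact PySem.Dict.contains_empty _) keysNodup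
  rw [h0, List.nil_append] at hitems
  have hmem : (String.ofList [l], PySem.List.count vet (String.ofList [l])) ∈ (cntOf vet).items := by
    rw [show (cntOf vet).items = _ from hitems]
    exact List.mem_map.mpr ⟨l, hl, rfl⟩
  have hkeys : (cntOf vet).keys.Nodup := by
    have : (cntOf vet).keys = lowerChars.map (fun c => String.ofList [c]) := by
      simp only [PySem.Dict.keys, show (cntOf vet).items = _ from hitems, List.map_map]
      rfl
    rw [this]; exact keysNodup
  have hget := PySem.Dict.get?_of_mem_items (cntOf vet) hmem hkeys
  rw [PySem.Dict.getD_eq_get?_getD, hget, Option.getD_some, PySem.List.count_eq]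

theorem x_eq (vet : List String) (i : Int) (hi : 0 ≤ i) :
    (if i < (vet.length : Int) then PySem.List.pyGet? vet i else none)
      = PySem.List.pyGet? vet i := by
  split_ifs with h
  · rfl
  · symm
    rw [PySem.List.pyGet?_eq_none_iff]
    intro hr
    unfold PySem.Raise.InRange at hr
    omega

-- A's 26-factorial rescore of the candidate equals B's bumped product
theorem dn_eq (vet : List String) (i : Int) (hi : 0 ≤ i) (j : Char) (hj : j ∈ lowerChars) :
    dnOf (retOf vet i j) = piVal vet i * (fcnt vet i j + 1) := by
  unfold dnOf
  rw [foldl_mul_eq, one_mul]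
  simp only [PySem.List.count_eq]
  have : lowerChars.map (fun l => pyFact (List.count (String.ofList [l]) (retOf vet i j)))
       = lowerChars.map (fun l => pyFact (fcnt vet i l + if l = j then 1 else 0)) := by
    apply List.map_congr_left
    intro a _
    rw [show List.count (String.ofList [a]) (retOf vet i j) = (retOf vet i j).count (String.ofList [a]) from rfl,
      count_retOf vet i hi j a]
  rw [this, prod_bump lowerChars lowerNodup j hj (fcnt vet i)]
  rfl

-- B's per-letter dn operand equals fcnt
theorem candB_eq (vet : List String) (i : Int) (_hi : 0 ≤ i) (j : Char) (hj : j ∈ lowerChars) :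
    (cntOf vet).getD (String.ofList [j]) 0 -
      (if some (String.ofList [j]) = PySem.List.pyGet? vet i then 1 else 0) = fcnt vet i j := by
  rw [getD_cnt vet j hj]
  unfold fcnt
  congr 1
  exact if_congr eq_comm rfl rfl

-- B's Pi product equals piVal
theorem pi_eq (vet : List String) (i : Int) (hi : 0 ≤ i) :
    lowerChars.foldl
      (fun p c => p * pyFact ((cntOf vet).getD (String.ofList [c]) 0 -
                              (if some (String.ofList [c]) = PySem.List.pyGet? vet i then 1 else 0))) 1
      = piVal vet i := by
  rw [foldl_mul_eq, one_mul]
  unfold piVal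
  apply congrArg
  apply List.map_congr_left
  intro c hc
  rw [candB_eq vet i hi c hc]

-- one candidate: A's rebuild-and-rescore step equals B's bump step on related states
theorem step_rel (vet : List String) (i : Int) (hi : 0 ≤ i) (j : Char) (hj : j ∈ lowerChars)
    (a : List String × Nat) (b : Option (Int × Char) × Nat)
    (h2 : a.2 = b.2) (h1 : a.1 = recon vet b.1) :
    (innerA vet i a j).2 = (innerB (cntOf vet) (PySem.List.pyGet? vet i) (piVal vet i) i b j).2 ∧
    (innerA vet i a j).1 = recon vet (innerB (cntOf vet) (PySem.List.pyGet? vet i) (piVal vet i) i b j).1 := by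
  simp only [innerA, innerB]
  have hr : (PySem.List.slice vet none (some i) ++ [String.ofList [j]]
             ++ PySem.List.slice vet (some (i + 1)) none) = retOf vet i j := rfl
  rw [hr, dn_eq vet i hi j hj, candB_eq vet i hi j hj, h2]
  by_cases hgt : piVal vet i * (fcnt vet i j + 1) > b.2
  · rw [if_pos hgt, if_pos hgt]
    exact ⟨rfl, rfl⟩
  · rw [if_neg hgt, if_neg hgt]
    exact ⟨h2, h1⟩

-- inner loops: A over ret-rebuilding vs B over (position, letter), related states stay related
theorem inner_rel (vet : List String) (i : Int) (hi : 0 ≤ i) :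
    ∀ (P : List Char), (∀ j ∈ P, j ∈ lowerChars) →
    ∀ (a : List String × Nat) (b : Option (Int × Char) × Nat),
      a.2 = b.2 → a.1 = recon vet b.1 →
      (P.foldl (innerA vet i) a).2
        = (P.foldl (innerB (cntOf vet) (PySem.List.pyGet? vet i) (piVal vet i) i) b).2 ∧
      (P.foldl (innerA vet i) a).1
        = recon vet (P.foldl (innerB (cntOf vet) (PySem.List.pyGet? vet i) (piVal vet i) i) b).1 := by
  intro P
  induction P with
  | nil => intro _ a b h2 h1; exact ⟨h2, h1⟩
  | cons j t ih =>
    intro hP a b h2 h1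
    have hj : j ∈ lowerChars := hP j (List.mem_cons_self)
    have hstep := step_rel vet i hi j hj a b h2 h1
    simp only [List.foldl_cons]
    exact ih (fun x hx => hP x (List.mem_cons_of_mem _ hx)) _ _ hstep.1 hstep.2

-- outer loops over range(n)
theorem fold_rel (vet : List String) (P : List Char) (hP : ∀ j ∈ P, j ∈ lowerChars) :
    ∀ (I : List Int), (∀ i ∈ I, 0 ≤ i) →
    ∀ (a : List String × Nat) (b : Option (Int × Char) × Nat),
      a.2 = b.2 → a.1 = recon vet b.1 →
      (I.foldl (fun st i => P.foldl (innerA vet i) st) a).2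
        = (I.foldl (outerB vet P (cntOf vet)) b).2 ∧
      (I.foldl (fun st i => P.foldl (innerA vet i) st) a).1
        = recon vet (I.foldl (outerB vet P (cntOf vet)) b).1 := by
  intro I
  induction I with
  | nil => intro _ a b h2 h1; exact ⟨h2, h1⟩
  | cons i t ih =>
    intro hI a b h2 h1
    have hi : 0 ≤ i := hI i (List.mem_cons_self)
    have hout : outerB vet P (cntOf vet) b i
        = P.foldl (innerB (cntOf vet) (PySem.List.pyGet? vet i) (piVal vet i) i) b := by
      simp only [outerB]
      rw [x_eq vet i hi, pi_eq vet i hi]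
    have hstep := inner_rel vet i hi P hP a b h2 h1
    simp only [List.foldl_cons, hout]
    exact ih (fun x hx => hI x (List.mem_cons_of_mem _ hx)) _ _ hstep.1 hstep.2

-- ===== VERDICT (by name: the statement is the Claim_ definition above) =====
theorem solve_spec : Claim_equal_solve := by
  intro n vet _
  unfold Spec_solve
  simp only [solve, solve_alt]
  rw [PySem.List.foldl_append_if (fun c => vet.contains (String.ofList [c])) (fun c => c)
    lowerChars [], List.nil_append, List.map_id']
  have hI : ∀ i ∈ PySem.List.pyRange 0 n 1, (0:Int) ≤ i := by
    intro i hi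
    exact (PySem.List.mem_pyRange_one.mp hi).1
  have hP : ∀ j ∈ lowerChars.filter (fun c => vet.contains (String.ofList [c])), j ∈ lowerChars :=
    fun j hj => List.mem_of_mem_filter hj
  have h := fold_rel vet (lowerChars.filter (fun c => vet.contains (String.ofList [c]))) hP
    (PySem.List.pyRange 0 n 1) hI ([], 0) (none, 0) rfl rfl
  rcases h with ⟨h2, h1⟩
  rw [h1]
  cases hb : ((PySem.List.pyRange 0 n 1).foldl
      (outerB vet (lowerChars.filter (fun c => vet.contains (String.ofList [c]))) (cntOf vet))
      (none, 0)).1 with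
  | none => simp [recon]; decide
  | some p =>
    cases p with
    | mk i j => simp [recon, retOf]
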